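-- pv_equiv track=rewrite | github.com/panorb/gti-boolean-simplification | notebook/simplify.py | group_terms
-- ===== SOURCE A (Python) =====
-- def group_terms(minTerms):
--     grouped = {}
--
--     for i in range(len(minTerms)):
--         term = minTerms[i]
--         one_count = 0
--
--         for j in range(len(minTerms[0])):
--             if (minTerms[i][j] == "1"): one_count += 1
--
--         if one_count in grouped:
--             grouped[one_count].append(term)
--         else:
--             grouped[one_count] = [term]
--
--     return grouped
-- ===== SOURCE B (Python) =====
-- def group_terms(minTerms):
--     if not minTerms:
--         return {}
--     n = len(minTerms[0])
--     counts = [sum(t[j] == "1" for j in range(n)) for t in minTerms]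
--     keys = list(dict.fromkeys(counts))
--     return {k: [t for t, c in zip(minTerms, counts) if c == k] for k in keys}
-- ===== Notes on version B (the rewrite author's own statement) =====
-- stated objective: alternative
-- what changed: B replaces A's imperative dict-mutation loop with a declarative pipeline: compute each term's key (count of positions among the first len(minTerms[0]) holding '1') once into a counts list, dedup the keys in first-occurrence order, and build the dict by one comprehension that filters terms per key.
import Mathlib
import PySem

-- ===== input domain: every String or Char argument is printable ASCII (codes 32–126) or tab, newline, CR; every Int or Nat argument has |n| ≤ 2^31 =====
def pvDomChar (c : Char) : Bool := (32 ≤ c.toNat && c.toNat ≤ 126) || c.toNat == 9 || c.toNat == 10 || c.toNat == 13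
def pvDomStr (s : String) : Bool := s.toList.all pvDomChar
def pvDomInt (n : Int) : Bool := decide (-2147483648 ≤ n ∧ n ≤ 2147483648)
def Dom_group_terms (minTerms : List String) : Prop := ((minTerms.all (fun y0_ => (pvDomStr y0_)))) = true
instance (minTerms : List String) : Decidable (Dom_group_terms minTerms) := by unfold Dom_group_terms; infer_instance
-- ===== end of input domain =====

-- B replaces A's imperative dict-mutation loop with a declarative pipeline (keys once, dedup, group
-- by filtering); same cost class, no speed claim. Equivalence is about the return value.

-- ===== PORT A =====
def group_terms (minTerms : List String) : List (Int × List String) :=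
  ((PySem.List.pyRange 0 (minTerms.length : Int) 1).foldl
    (fun (grouped : PySem.Dict Int (List String)) i =>
      let term := PySem.List.pyGetD minTerms i ""
      let one_count : Int :=
        (PySem.List.pyRange 0 (PySem.Str.len (PySem.List.pyGetD minTerms 0 "")) 1).foldl
          (fun c j => if PySem.Str.pyGet? term j == some '1' then c + 1 else c) 0
      if grouped.contains one_count then
        grouped.modify one_count [] (fun l => l ++ [term])
      else
        grouped.insert one_count [term])
    PySem.Dict.empty).items

-- ===== PORT B =====
def group_terms_alt (minTerms : List String) : List (Int × List String) :=
  if minTerms.isEmpty then []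
  else
    let n : Int := PySem.Str.len (PySem.List.pyGetD minTerms 0 "")
    let counts : List Int :=
      minTerms.map (fun t =>
        ((PySem.List.pyRange 0 n 1).map
          (fun j => if PySem.Str.pyGet? t j == some '1' then (1 : Int) else 0)).sum)
    let keys := PySem.List.dedup counts
    keys.map (fun k =>
      (k, ((minTerms.zip counts).filter (fun p => p.2 == k)).map (fun p => p.1)))

-- ===== PRECONDITION & SPEC =====
-- Pre_ excludes exactly the inputs where A raises IndexError: some term shorter than the first one.
def Pre_group_terms (minTerms : List String) : Prop :=
  ∀ t ∈ minTerms, (PySem.List.pyGetD minTerms 0 "").toList.length ≤ t.toList.length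
instance (minTerms : List String) : Decidable (Pre_group_terms minTerms) := by
  unfold Pre_group_terms; infer_instance
def pvWitness_group_terms : List String := ["11", "01", "00", "10"]

def Spec_group_terms (minTerms : List String) (out : List (Int × List String)) : Prop :=
  out = group_terms_alt minTerms
instance (minTerms : List String) (out : List (Int × List String)) :
    Decidable (Spec_group_terms minTerms out) := by unfold Spec_group_terms; infer_instance

-- ===== CLAIM (what is proved, stated in full; the proofs are below) =====
def Claim_equal_group_terms : Prop :=
  ∀ (minTerms : List String), Dom_group_terms minTerms → Pre_group_terms minTerms →
    Spec_group_terms minTerms (group_terms minTerms)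
-- ===== LEMMAS AND PROOFS =====

-- the key function both programs compute (count of '1' among the first n characters)
def pvKey (n : Nat) (t : String) : Int := ((t.toList.take n).count '1' : Int)

-- A's inner loop computes pvKey when the term has at least n characters
theorem pvInner_eq_key (t : String) (n : Nat) (hn : n ≤ t.toList.length) :
    (PySem.List.pyRange 0 (n : Int) 1).foldl
      (fun c j => if PySem.Str.pyGet? t j == some '1' then c + 1 else c) (0 : Int)
      = pvKey n t := by
  induction n with
  | zero => simp [PySem.List.pyRange_one_eq_nil, pvKey]
  | succ m ih =>
      have hm : m ≤ t.toList.length := by omega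
      have hlt : m < t.toList.length := by omega
      rw [show ((m + 1 : Nat) : Int) = (m : Int) + 1 by push_cast; ring,
        PySem.List.pyRange_one_succ_right (by positivity), List.foldl_append, ih hm]
      rw [List.foldl_cons, List.foldl_nil, PySem.Str.pyGet?_natCast,
        List.getElem?_eq_getElem hlt]
      unfold pvKey
      rw [List.take_add_one, List.getElem?_eq_getElem hlt, List.count_append]
      by_cases h1 : t.toList[m] = '1' <;> simp [h1]

theorem pvZip_self_map {α β : Type} (f : α → β) (l : List α) :
    l.zip (l.map f) = l.map (fun x => (x, f x)) := by
  induction l with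
  | nil => rfl
  | cons h t ih => simp [ih]

-- B's per-term key (a sum of 0/1 over the first n positions) equals pvKey
theorem pvAltKey_eq (t : String) (n : Nat) (hn : n ≤ t.toList.length) :
    ((PySem.List.pyRange 0 (n : Int) 1).map
      (fun j => if PySem.Str.pyGet? t j == some '1' then (1 : Int) else 0)).sum = pvKey n t := by
  induction n with
  | zero => simp [PySem.List.pyRange_one_eq_nil, pvKey]
  | succ m ih =>
      have hm : m ≤ t.toList.length := by omega
      have hlt : m < t.toList.length := by omega
      rw [show ((m + 1 : Nat) : Int) = (m : Int) + 1 by push_cast; ring,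
        PySem.List.pyRange_one_succ_right (by positivity), List.map_append, List.sum_append,
        ih hm]
      rw [List.map_cons, List.map_nil, PySem.Str.pyGet?_natCast,
        List.getElem?_eq_getElem hlt]
      unfold pvKey
      rw [List.take_add_one, List.getElem?_eq_getElem hlt, List.count_append]
      by_cases h1 : t.toList[m] = '1' <;> simp [h1]

-- the contains/append-or-insert step is a single modify
theorem pvStep_eq_modify (d : PySem.Dict Int (List String)) (c : Int) (t : String) :
    (if d.contains c then d.modify c [] (fun l => l ++ [t]) else d.insert c [t])
      = d.modify c [] (fun l => l ++ [t]) := by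
  by_cases h : d.contains c
  · simp [h]
  · simp only [h, if_neg, Bool.false_eq_true, not_false_eq_true, PySem.Dict.modify,
      PySem.Dict.getD_of_not_contains d [] (by simpa using h)]
    rfl

-- A's whole loop, rewritten as a fold of modifies keyed by pvKey
theorem pvA_eq_fold (minTerms : List String) (hpre : Pre_group_terms minTerms) :
    group_terms minTerms =
      (minTerms.foldl (fun d t =>
        d.modify (pvKey (PySem.List.pyGetD minTerms 0 "").toList.length t) []
          (fun l => l ++ [t])) PySem.Dict.empty).items := by
  unfold group_terms
  rw [show (minTerms.length : Int) = PySem.List.len minTerms by simp [PySem.List.len_eq],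
    PySem.List.foldl_pyRange_zero_pyGetD minTerms ""
      (fun (grouped : PySem.Dict Int (List String)) term =>
        let one_count : Int :=
          (PySem.List.pyRange 0 (PySem.Str.len (PySem.List.pyGetD minTerms 0 "")) 1).foldl
            (fun c j => if PySem.Str.pyGet? term j == some '1' then c + 1 else c) 0
        if grouped.contains one_count then
          grouped.modify one_count [] (fun l => l ++ [term])
        else
          grouped.insert one_count [term])]
  congr 1
  apply PySem.List.foldl_congr_mem
  intro acc t ht
  have hlen : PySem.Str.len (PySem.List.pyGetD minTerms 0 "") =
      (((PySem.List.pyGetD minTerms 0 "").toList.length : Nat) : Int) := by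
    simp [PySem.Str.len_eq]
  simp only [hlen, pvInner_eq_key t _ (hpre t ht), pvStep_eq_modify]

-- the common grouped shape both programs produce
theorem pvFold_items (minTerms : List String) (kf : String → Int) :
    (minTerms.foldl (fun d t => d.modify (kf t) [] (fun l => l ++ [t]))
        PySem.Dict.empty).items =
      (PySem.Set.ofList (minTerms.map kf)).map
        (fun k => (k, minTerms.filter (fun t => kf t == k))) := by
  have hnodup : (minTerms.foldl (fun d t => d.modify (kf t) [] (fun l => l ++ [t]))
      (PySem.Dict.empty : PySem.Dict Int (List String))).keys.Nodup :=
    PySem.Dict.nodup_keys_foldl_modify_key minTerms kf [] (fun _ t => fun l => l ++ [t])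
      PySem.Dict.empty (by simp [PySem.Dict.keys_empty])
  rw [PySem.Dict.items_eq_map_keys _ hnodup []]
  have hkeys : (minTerms.foldl (fun d t => d.modify (kf t) [] (fun l => l ++ [t]))
      (PySem.Dict.empty : PySem.Dict Int (List String))).keys =
      PySem.Set.ofList (minTerms.map kf) := by
    rw [PySem.Dict.keys_foldl_modify_key minTerms kf [] (fun _ t => fun l => l ++ [t])]
    simp [PySem.Dict.keys_empty, PySem.Set.update, PySem.Set.ofList]
  rw [hkeys]
  apply List.map_congr_left
  intro k _
  have hfold : minTerms.foldl (fun d t => d.modify (kf t) [] (fun l => l ++ [t]))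
      (PySem.Dict.empty : PySem.Dict Int (List String)) =
      (minTerms.map (fun t => (kf t, t))).foldl
        (fun d p => d.modify p.1 [] (fun l => l ++ [p.2])) PySem.Dict.empty := by
    rw [List.foldl_map]
  rw [hfold, PySem.Dict.getD_foldl_modify_append]
  simp [List.filter_map, Function.comp_def]

-- B in the nonempty case, reduced to the same shape
theorem pvB_eq (minTerms : List String) (hne : minTerms ≠ []) (hpre : Pre_group_terms minTerms) :
    group_terms_alt minTerms =
      (PySem.Set.ofList (minTerms.map
          (pvKey (PySem.List.pyGetD minTerms 0 "").toList.length))).map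
        (fun k => (k, minTerms.filter
          (fun t => pvKey (PySem.List.pyGetD minTerms 0 "").toList.length t == k))) := by
  unfold group_terms_alt
  rw [if_neg (by simpa using hne)]
  have hlen : PySem.Str.len (PySem.List.pyGetD minTerms 0 "") =
      (((PySem.List.pyGetD minTerms 0 "").toList.length : Nat) : Int) := by
    simp [PySem.Str.len_eq]
  have hcounts : minTerms.map (fun t =>
      ((PySem.List.pyRange 0 (((PySem.List.pyGetD minTerms 0 "").toList.length : Nat) : Int) 1).map
        (fun j => if PySem.Str.pyGet? t j == some '1' then (1 : Int) else 0)).sum) =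
      minTerms.map (pvKey (PySem.List.pyGetD minTerms 0 "").toList.length) :=
    List.map_congr_left (fun t ht => pvAltKey_eq t _ (hpre t ht))
  simp only [hlen, hcounts, PySem.List.dedup_eq_ofList, pvZip_self_map]
  apply List.map_congr_left
  intro k _
  simp [List.filter_map, Function.comp_def]

-- ===== VERDICT (by name: the statement is the Claim_ definition above) =====
theorem group_terms_spec : Claim_equal_group_terms := by
  intro minTerms _ hpre
  unfold Spec_group_terms
  rcases minTerms with _ | ⟨t0, rest⟩
  · decide
  · rw [pvA_eq_fold _ hpre, pvFold_items, pvB_eq _ (by simp) hpre]
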